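-- pv_equiv track=rewrite | github.com/vinamra57/gitstory | src/gitstory/parser/data_cleaner.py | _format_commits_by_type
-- ===== SOURCE A (Python) =====
-- from typing import Dict, List
--
-- def _format_commits_by_type(commits: List[Dict], stats: Dict) -> str:
--     """Format commits grouped by type."""
--     if not commits:
--         return "No commits"
--
--     # Group commits by type (manually since we don't have grouped data here)
--     by_type = {}
--     for commit in commits:
--         # Infer type from stats or classify
--         commit_type = "other"  # Default
--         by_type.setdefault(commit_type, []).append(commit)
--
--     lines = []
--     for commit_type, type_commits in sorted(by_type.items()):
--         lines.append(f"### {commit_type.upper()} ({len(type_commits)} commits)")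
--         for commit in type_commits[:5]:  # Show max 5 per type
--             lines.append(
--                 f"- [{commit['hash']}] {commit['author']}: {commit['message'][:80]}"
--             )
--         if len(type_commits) > 5:
--             lines.append(f"... and {len(type_commits) - 5} more")
--
--     return "\n".join(lines)
-- ===== SOURCE B (Python) =====
-- from typing import Dict, List
--
-- def _format_commits_by_type(commits: List[Dict], stats: Dict) -> str:
--     """Every commit is classified as 'other', so format directly without a grouping table."""
--     if not commits:
--         return "No commits"
--     n = len(commits)
--     body = [
--         f"- [{c['hash']}] {c['author']}: {c['message'][:80]}"
--         for c in commits[:5]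
--     ]
--     tail = [f"... and {n - 5} more"] if n > 5 else []
--     return "\n".join([f"### OTHER ({n} commits)"] + body + tail)
-- ===== Notes on version B (the rewrite author's own statement) =====
-- stated objective: simpler
-- what changed: B drops A's grouping dict and sort entirely (every commit is classified as the constant 'other', so the table always has one group equal to the whole list) and formats the header, the first five commits and the overflow line in one direct pass.
import Mathlib
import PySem

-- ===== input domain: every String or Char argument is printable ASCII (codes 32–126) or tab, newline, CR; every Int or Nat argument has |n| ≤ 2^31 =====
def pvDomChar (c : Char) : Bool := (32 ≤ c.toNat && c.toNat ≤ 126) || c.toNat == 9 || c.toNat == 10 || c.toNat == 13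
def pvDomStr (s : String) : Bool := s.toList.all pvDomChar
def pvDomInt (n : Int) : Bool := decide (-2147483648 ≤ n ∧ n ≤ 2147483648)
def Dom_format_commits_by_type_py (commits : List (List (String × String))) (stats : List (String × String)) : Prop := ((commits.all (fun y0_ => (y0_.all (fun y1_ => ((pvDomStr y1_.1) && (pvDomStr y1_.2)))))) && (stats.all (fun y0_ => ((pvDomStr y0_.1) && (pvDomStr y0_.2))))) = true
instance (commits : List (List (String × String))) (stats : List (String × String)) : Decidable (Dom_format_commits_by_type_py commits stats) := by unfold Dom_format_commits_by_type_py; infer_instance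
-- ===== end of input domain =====

-- B drops A's no-op grouping dict (every commit classifies to "other") and formats the commits in one
-- direct pass; objective: simpler. Exact on inputs whose first five commits carry all three keys (Pre_).

-- shared line formatter: f"- [{c['hash']}] {c['author']}: {c['message'][:80]}" (exact under Pre_:
-- getD's default is never reached when the keys are present)
def pvFmtLine (commit : List (String × String)) : String :=
  let d := PySem.Dict.ofList commit
  PySem.Str.join "" ["- [", d.getD "hash" "", "] ", d.getD "author" "", ": ",
    PySem.Str.slice (d.getD "message" "") none (some 80)]

-- ===== PORT A =====
def format_commits_by_type_py (commits : List (List (String × String))) (stats : List (String × String)) : String :=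
  if commits = [] then "No commits"
  else
    -- by_type = {}; for commit in commits: by_type.setdefault("other", []).append(commit)
    let by_type : PySem.Dict String (List (List (String × String))) :=
      commits.foldl (fun d commit => d.modify "other" [] (fun l => l ++ [commit])) PySem.Dict.empty
    -- for commit_type, type_commits in sorted(by_type.items()):  (keys unique, so key = fst is exact)
    let lines : List String :=
      (PySem.List.sorted by_type.items (fun p => p.1) false).foldl
        (fun lines p =>
          let lines := lines ++ [PySem.Str.join "" ["### ", PySem.Str.upper p.1, " (",
            PySem.Int.toStr (p.2.length : Int), " commits)"]]
          let lines := (PySem.List.slice p.2 none (some 5)).foldl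
            (fun ls c => ls ++ [pvFmtLine c]) lines
          if 5 < p.2.length then
            lines ++ [PySem.Str.join "" ["... and ", PySem.Int.toStr ((p.2.length : Int) - 5), " more"]]
          else lines)
        []
    PySem.Str.join "\n" lines

-- ===== PORT B =====
def format_commits_by_type_py_alt (commits : List (List (String × String))) (stats : List (String × String)) : String :=
  if commits = [] then "No commits"
  else
    let n := commits.length
    let body := (PySem.List.slice commits none (some 5)).map pvFmtLine
    let tail := if 5 < n then [PySem.Str.join "" ["... and ", PySem.Int.toStr ((n : Int) - 5), " more"]] else []
    PySem.Str.join "\n"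
      ([PySem.Str.join "" ["### OTHER (", PySem.Int.toStr (n : Int), " commits)"]] ++ body ++ tail)

-- ===== PRECONDITION & SPEC =====
-- Pre_ excludes exactly the inputs where Python A raises KeyError: a commit among the first five
-- missing one of the keys 'hash', 'author', 'message' (B raises there too).
def Pre_format_commits_by_type_py (commits : List (List (String × String))) (stats : List (String × String)) : Prop :=
  ∀ c ∈ commits.take 5, ((PySem.Dict.ofList c).contains "hash" = true) ∧
    ((PySem.Dict.ofList c).contains "author" = true) ∧ ((PySem.Dict.ofList c).contains "message" = true)
instance (commits : List (List (String × String))) (stats : List (String × String)) : Decidable (Pre_format_commits_by_type_py commits stats) := by unfold Pre_format_commits_by_type_py; infer_instance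
def pvWitness_format_commits_by_type_py : (List (List (String × String))) × (List (String × String)) :=
  ([[("hash", "abc1"), ("author", "Ann"), ("message", "init")]], [])

def Spec_format_commits_by_type_py (commits : List (List (String × String))) (stats : List (String × String)) (out : String) : Prop := out = format_commits_by_type_py_alt commits stats
instance (commits : List (List (String × String))) (stats : List (String × String)) (out : String) : Decidable (Spec_format_commits_by_type_py commits stats out) := by unfold Spec_format_commits_by_type_py; infer_instance

-- ===== CLAIM (what is proved, stated in full; the proofs are below) =====
def Claim_equal_format_commits_by_type_py : Prop := ∀ (commits : List (List (String × String))) (stats : List (String × String)), Dom_format_commits_by_type_py commits stats → Pre_format_commits_by_type_py commits stats → Spec_format_commits_by_type_py commits stats (format_commits_by_type_py commits stats)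

-- ===== LEMMAS AND PROOFS =====

-- the grouping loop builds the single-entry dict {"other": commits}
theorem pv_fold_dict (cs : List (List (String × String))) (acc : List (List (String × String))) :
    cs.foldl (fun d commit => d.modify "other" [] (fun l => l ++ [commit]))
      (PySem.Dict.mk [("other", acc)]) = PySem.Dict.mk [("other", acc ++ cs)] := by
  induction cs generalizing acc with
  | nil => simp
  | cons c cs ih =>
    simp only [List.foldl_cons]
    have h : (PySem.Dict.mk [("other", acc)]).modify "other" [] (fun l => l ++ [c])
        = PySem.Dict.mk [("other", acc ++ [c])] := by rfl
    rw [h, ih]; simp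

theorem pv_fold_lines {α β : Type} (f : α → β) (xs : List α) (init : List β) :
    xs.foldl (fun ls c => ls ++ [f c]) init = init ++ xs.map f := by
  induction xs generalizing init with
  | nil => simp
  | cons x xs ih => simp [ih]

theorem pv_hup : PySem.Str.upper "other" = "OTHER" := by decide

theorem pv_hdr (x : String) :
    PySem.Str.join "" ["### ", "OTHER", " (", x, " commits)"] =
      PySem.Str.join "" ["### OTHER (", x, " commits)"] := by
  unfold PySem.Str.join
  congr 1

-- ===== VERDICT (by name: the statement is the Claim_ definition above) =====
theorem format_commits_by_type_py_spec : Claim_equal_format_commits_by_type_py := by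
  intro commits stats _ _
  unfold Spec_format_commits_by_type_py format_commits_by_type_py format_commits_by_type_py_alt
  by_cases h : commits = []
  · simp [h]
  · simp only [if_neg h]
    obtain ⟨c, cs, rfl⟩ := List.exists_cons_of_ne_nil h
    have hd : (c :: cs).foldl (fun d commit => d.modify "other" [] (fun l => l ++ [commit]))
        PySem.Dict.empty = PySem.Dict.mk [("other", c :: cs)] := by
      simp only [List.foldl_cons]
      have h0 : PySem.Dict.empty.modify "other" [] (fun l => l ++ [c])
          = PySem.Dict.mk [("other", [c])] := by rfl
      rw [h0]
      simpa using pv_fold_dict cs [c]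
    rw [hd]
    have hsort : PySem.List.sorted (PySem.Dict.mk [("other", c :: cs)]).items
        (fun p => p.1) false = [("other", c :: cs)] := by
      apply PySem.List.sorted_eq_self_of_pairwise; simp
    rw [hsort]
    simp only [List.foldl_cons, List.foldl_nil, List.nil_append]
    rw [pv_fold_lines, pv_hup, pv_hdr]
    congr 1
    split_ifs
    · simp only [List.append_assoc]
    · simp only [List.append_nil]
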